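-- pv_equiv track=rewrite | github.com/leo-mazz/proj1 | information_loss.py | dm_star_formula
-- ===== SOURCE A (Python) =====
-- def dm_star_formula(gen_rules, gen_status, dataset, generalization):
--     def group_generalization(records, qis):
--         values = lambda record: tuple([record[idx] for idx in qis])
--
--         eq_classes = {}
--         for r in records:
--             r_signature = values(r)
--             if r_signature in eq_classes.keys():
--                 eq_classes[r_signature].append(r)
--             else:
--                 eq_classes[r_signature] = [r]
--
--         return eq_classes.values()
--
--     grouped_generalization = group_generalization(generalization, gen_rules.keys())
--     records_per_class = [len(ec) for ec in grouped_generalization]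
--     loss = 0
--     for ec_size in records_per_class:
--         loss += ec_size**2
--
--     return loss
-- ===== SOURCE B (Python) =====
-- def dm_star_formula(gen_rules, gen_status, dataset, generalization):
--     # One pass: running count per QI signature; (c+1)^2 - c^2 = 2c + 1,
--     # so the accumulated loss equals the sum of squared class sizes.
--     qis = list(gen_rules.keys())
--     counts = {}
--     loss = 0
--     for record in generalization:
--         sig = tuple(record[k] for k in qis)
--         c = counts.get(sig, 0)
--         loss += 2 * c + 1
--         counts[sig] = c + 1
--     return loss
-- ===== Notes on version B (the rewrite author's own statement) =====
-- stated objective: simpler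
-- what changed: Instead of building per-class lists of records and then summing squared lengths in a second loop, B keeps only a signature->count dict and accumulates the loss in the same single pass via the telescoping identity (c+1)^2 - c^2 = 2c+1.
import Mathlib
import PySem

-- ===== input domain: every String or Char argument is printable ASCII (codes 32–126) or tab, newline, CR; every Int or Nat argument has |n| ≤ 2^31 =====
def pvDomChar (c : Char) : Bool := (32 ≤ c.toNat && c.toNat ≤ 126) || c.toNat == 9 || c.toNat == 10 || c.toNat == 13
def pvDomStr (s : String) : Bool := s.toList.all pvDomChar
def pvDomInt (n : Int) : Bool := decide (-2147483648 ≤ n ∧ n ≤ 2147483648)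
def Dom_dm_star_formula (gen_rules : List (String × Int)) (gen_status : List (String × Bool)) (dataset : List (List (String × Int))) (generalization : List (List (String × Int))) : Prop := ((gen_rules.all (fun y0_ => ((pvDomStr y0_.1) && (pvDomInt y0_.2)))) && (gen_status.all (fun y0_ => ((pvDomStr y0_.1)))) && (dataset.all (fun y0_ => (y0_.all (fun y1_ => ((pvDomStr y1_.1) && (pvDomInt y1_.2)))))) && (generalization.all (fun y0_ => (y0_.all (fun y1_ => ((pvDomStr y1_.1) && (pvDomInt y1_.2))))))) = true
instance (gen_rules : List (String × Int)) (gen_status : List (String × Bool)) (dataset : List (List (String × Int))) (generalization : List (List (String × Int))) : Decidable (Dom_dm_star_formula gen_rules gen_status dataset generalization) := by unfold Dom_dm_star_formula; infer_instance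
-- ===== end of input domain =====

-- B replaces A's grouping-into-lists + second summation loop by a single pass keeping only a
-- signature→count dict and accumulating 2c+1 per record (telescoping (c+1)^2 - c^2); objective: simpler.

-- ===== PORT A =====
-- shared helper: the QI signature of a record, tuple(record[idx] for idx in qis)
def pvSig (qis : List String) (r : List (String × Int)) : List (Option Int) :=
  qis.map (fun k => (PySem.Dict.ofList r).get? k)

def dm_star_formula (gen_rules : List (String × Int)) (gen_status : List (String × Bool)) (dataset : List (List (String × Int))) (generalization : List (List (String × Int))) : Int :=
  let qis := (PySem.Dict.ofList gen_rules).keys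
  let eq_classes := generalization.foldl
    (fun (d : PySem.Dict (List (Option Int)) (List (List (String × Int)))) r =>
      if d.contains (pvSig qis r) then d.modify (pvSig qis r) [] (fun ec => ec ++ [r])
      else d.insert (pvSig qis r) [r])
    PySem.Dict.empty
  let records_per_class := eq_classes.values.map (fun ec => ((ec.length : Int)))
  records_per_class.foldl (fun loss ec_size => loss + ec_size ^ 2) 0

-- ===== PORT B =====
def dm_star_formula_alt (gen_rules : List (String × Int)) (gen_status : List (String × Bool)) (dataset : List (List (String × Int))) (generalization : List (List (String × Int))) : Int :=
  let qis := (PySem.Dict.ofList gen_rules).keys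
  let p := generalization.foldl
    (fun (p : PySem.Dict (List (Option Int)) Int × Int) r =>
      let sig := pvSig qis r
      let c := p.1.getD sig 0
      (p.1.insert sig (c + 1), p.2 + 2 * c + 1))
    (PySem.Dict.empty, 0)
  p.2

-- ===== PRECONDITION & SPEC =====
-- Pre_ excludes exactly the inputs where Python's record[idx] raises KeyError: some record of
-- generalization lacks one of gen_rules' keys.
def Pre_dm_star_formula (gen_rules : List (String × Int)) (gen_status : List (String × Bool)) (dataset : List (List (String × Int))) (generalization : List (List (String × Int))) : Prop :=
  ∀ r ∈ generalization, ∀ k ∈ (PySem.Dict.ofList gen_rules).keys, ((PySem.Dict.ofList r).get? k).isSome = true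
instance (gen_rules : List (String × Int)) (gen_status : List (String × Bool)) (dataset : List (List (String × Int))) (generalization : List (List (String × Int))) : Decidable (Pre_dm_star_formula gen_rules gen_status dataset generalization) := by unfold Pre_dm_star_formula; infer_instance

def pvWitness_dm_star_formula : (List (String × Int)) × (List (String × Bool)) × (List (List (String × Int))) × (List (List (String × Int))) :=
  ([("a", 1)], [], [], [[("a", 5)], [("a", 5)], [("a", 6)]])

def Spec_dm_star_formula (gen_rules : List (String × Int)) (gen_status : List (String × Bool)) (dataset : List (List (String × Int))) (generalization : List (List (String × Int))) (out : Int) : Prop := out = dm_star_formula_alt gen_rules gen_status dataset generalization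
instance (gen_rules : List (String × Int)) (gen_status : List (String × Bool)) (dataset : List (List (String × Int))) (generalization : List (List (String × Int))) (out : Int) : Decidable (Spec_dm_star_formula gen_rules gen_status dataset generalization out) := by unfold Spec_dm_star_formula; infer_instance

-- ===== CLAIM (what is proved, stated in full; the proofs are below) =====
def Claim_equal_dm_star_formula : Prop := ∀ (gen_rules : List (String × Int)) (gen_status : List (String × Bool)) (dataset : List (List (String × Int))) (generalization : List (List (String × Int))), Dom_dm_star_formula gen_rules gen_status dataset generalization → Pre_dm_star_formula gen_rules gen_status dataset generalization → Spec_dm_star_formula gen_rules gen_status dataset generalization (dm_star_formula gen_rules gen_status dataset generalization)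

-- ===== LEMMAS AND PROOFS =====

-- the common value both programs compute: sum over the distinct signatures of (multiplicity)^2
def pvG (s : List (List (Option Int))) : Int :=
  ((PySem.Set.ofList s).map (fun k => ((s.count k : Int)) ^ 2)).sum

lemma pv_sum_bump (Kl : List (List (Option Int))) (x : List (Option Int))
    (hnd : Kl.Nodup) (hx : x ∈ Kl) (c : List (Option Int) → Int) :
    (Kl.map (fun k => (c k + if k = x then 1 else 0) ^ 2)).sum
      = (Kl.map (fun k => (c k) ^ 2)).sum + 2 * c x + 1 := by
  induction Kl with
  | nil => cases hx
  | cons a t ih =>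
    by_cases hax : a = x
    · subst hax
      have hnot : a ∉ t := (List.nodup_cons.mp hnd).1
      have ht : t.map (fun k => (c k + if k = a then 1 else 0) ^ 2) = t.map (fun k => (c k) ^ 2) := by
        refine List.map_congr_left (fun k hk => ?_)
        have : k ≠ a := fun he => hnot (he ▸ hk)
        simp [this]
      rw [List.map_cons, List.map_cons, List.sum_cons, List.sum_cons, ht, if_pos rfl]
      ring
    · have hx' : x ∈ t := by
        rcases List.mem_cons.mp hx with h | h
        · exact absurd h.symm hax
        · exact h
      rw [List.map_cons, List.map_cons, List.sum_cons, List.sum_cons, if_neg hax,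
        ih (List.nodup_cons.mp hnd).2 hx']
      ring

lemma pvG_append (s : List (List (Option Int))) (x : List (Option Int)) :
    pvG (s ++ [x]) = pvG s + 2 * (s.count x : Int) + 1 := by
  unfold pvG
  rw [PySem.Set.ofList_append_singleton]
  have hcount : ∀ k, (((s ++ [x]).count k : Int)) = (s.count k : Int) + if k = x then 1 else 0 := by
    intro k
    by_cases h : k = x
    · have hx' : (x == k) = true := beq_iff_eq.mpr h.symm
      rw [List.count_append, List.count_singleton, hx', if_pos rfl, if_pos h]
      push_cast; ring
    · have hx' : (x == k) = false := beq_eq_false_iff_ne.mpr (fun he => h he.symm)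
      rw [List.count_append, List.count_singleton, hx', if_neg (by simp), if_neg h]
      push_cast; ring
  by_cases hx : x ∈ s
  · rw [PySem.Set.add_of_mem (by simpa [PySem.Set.mem_ofList] using hx)]
    have hmap : (PySem.Set.ofList s).map (fun k => (((s ++ [x]).count k : Int)) ^ 2)
        = (PySem.Set.ofList s).map (fun k => ((s.count k : Int) + if k = x then 1 else 0) ^ 2) :=
      List.map_congr_left (fun k _ => by rw [hcount k])
    rw [hmap, pv_sum_bump (PySem.Set.ofList s) x (PySem.Set.nodup_ofList s)
          ((PySem.Set.mem_ofList s x).mpr hx) (fun k => ((s.count k : Int)))]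
  · rw [PySem.Set.add_of_not_mem (fun hm => hx ((PySem.Set.mem_ofList s x).mp hm))]
    have hzero : s.count x = 0 := List.count_eq_zero.mpr hx
    have hmap : (PySem.Set.ofList s).map (fun k => (((s ++ [x]).count k : Int)) ^ 2)
        = (PySem.Set.ofList s).map (fun k => ((s.count k : Int)) ^ 2) := by
      refine List.map_congr_left (fun k hk => ?_)
      have hks : k ∈ s := (PySem.Set.mem_ofList s k).mp hk
      have hkx : k ≠ x := fun he => hx (he ▸ hks)
      rw [hcount k, if_neg hkx]; ring
    rw [List.map_append, List.sum_append, hmap, List.map_singleton, List.sum_singleton,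
      hcount x, if_pos rfl, hzero]
    push_cast; ring

lemma pvB_fst (s : List (List (Option Int))) (d : PySem.Dict (List (Option Int)) Int) (acc : Int) :
    (s.foldl (fun (p : PySem.Dict (List (Option Int)) Int × Int) k =>
        let c := p.1.getD k 0
        (p.1.insert k (c + 1), p.2 + 2 * c + 1)) (d, acc)).1
      = s.foldl (fun d k => d.insert k (d.getD k 0 + 1)) d := by
  induction s generalizing d acc with
  | nil => rfl
  | cons a t ih => exact ih _ _

lemma pvB_eq_g (s : List (List (Option Int))) :
    (s.foldl (fun (p : PySem.Dict (List (Option Int)) Int × Int) k =>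
        let c := p.1.getD k 0
        (p.1.insert k (c + 1), p.2 + 2 * c + 1)) (PySem.Dict.empty, 0)).2 = pvG s := by
  induction s using List.reverseRecOn with
  | nil => rfl
  | append_singleton s x ih =>
    rw [List.foldl_append, List.foldl_cons, List.foldl_nil]
    have hfst := pvB_fst s PySem.Dict.empty 0
    rw [PySem.Dict.foldl_insert_getD_add_one_eq_counter] at hfst
    simp only [hfst, PySem.Dict.getD_counter, pvG_append, ih]

-- B's fold over records, through the signature map
lemma pvB_eq_g' (l : List (List (String × Int))) (f : List (String × Int) → List (Option Int)) :
    (l.foldl (fun (p : PySem.Dict (List (Option Int)) Int × Int) r =>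
        (p.1.insert (f r) (p.1.getD (f r) 0 + 1), p.2 + 2 * p.1.getD (f r) 0 + 1))
      (PySem.Dict.empty, 0)).2 = pvG (l.map f) := by
  have h := pvB_eq_g (l.map f)
  rw [List.foldl_map] at h
  exact h

lemma pvA_eq_g (l : List (List (String × Int))) (f : List (String × Int) → List (Option Int)) :
    (((l.foldl (fun (d : PySem.Dict (List (Option Int)) (List (List (String × Int)))) r =>
          if d.contains (f r) then d.modify (f r) [] (fun ec => ec ++ [r])
          else d.insert (f r) [r]) PySem.Dict.empty).values.map
        (fun ec => ((ec.length : Int)))).foldl (fun loss z => loss + z ^ 2) 0)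
      = pvG (l.map f) := by
  have hstep : l.foldl (fun (d : PySem.Dict (List (Option Int)) (List (List (String × Int)))) r =>
        if d.contains (f r) then d.modify (f r) [] (fun ec => ec ++ [r])
        else d.insert (f r) [r]) PySem.Dict.empty
      = (l.map (fun r => (f r, r))).foldl (fun d p => d.modify p.1 [] (fun ec => ec ++ [p.2])) PySem.Dict.empty := by
    rw [List.foldl_map]
    refine PySem.List.foldl_congr_mem l _ _ _ (fun d r _ => ?_)
    by_cases h : d.contains (f r)
    · rw [if_pos h]
    · rw [if_neg h, PySem.Dict.modify]
      simp only
      rw [PySem.Dict.getD_of_not_contains d [] (Bool.not_eq_true _ ▸ h), List.nil_append]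
  rw [hstep]
  set l' := l.map (fun r => (f r, r)) with hl'
  have hnd : ((l'.foldl (fun d p => d.modify p.1 [] (fun ec => ec ++ [p.2])) PySem.Dict.empty).keys).Nodup :=
    PySem.Dict.nodup_keys_foldl_modify_key l' Prod.fst [] _ PySem.Dict.empty PySem.Dict.nodup_keys_empty
  have hkeys : (l'.foldl (fun d p => d.modify p.1 [] (fun ec => ec ++ [p.2])) PySem.Dict.empty).keys
      = PySem.Set.ofList (l.map f) := by
    rw [PySem.Dict.keys_foldl_modify_key, PySem.Dict.keys_empty, PySem.Set.update_nil_left, hl',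
      List.map_map]
    rfl
  rw [PySem.Dict.values_eq_map_keys _ hnd [], PySem.List.foldl_add (g := fun z => z ^ 2), hkeys,
    List.map_map, List.map_map, zero_add]
  unfold pvG
  refine congrArg List.sum (List.map_congr_left (fun k hk => ?_))
  simp only [Function.comp_apply]
  rw [PySem.Dict.getD_foldl_modify_append, PySem.Dict.getD_empty, List.nil_append]
  have hlen : ((l'.filter (fun p => p.1 == k)).map Prod.snd).length = (l.map f).count k := by
    rw [List.length_map, ← List.countP_eq_length_filter, hl', List.countP_map, List.count_eq_countP,
      List.countP_map]
    rfl
  rw [hlen]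

-- ===== VERDICT (by name: the statement is the Claim_ definition above) =====
theorem dm_star_formula_spec : Claim_equal_dm_star_formula := by
  intro gen_rules gen_status dataset generalization _ _
  show dm_star_formula gen_rules gen_status dataset generalization
      = dm_star_formula_alt gen_rules gen_status dataset generalization
  unfold dm_star_formula dm_star_formula_alt
  dsimp only
  rw [pvA_eq_g generalization (pvSig ((PySem.Dict.ofList gen_rules).keys)),
    ← pvB_eq_g' generalization (pvSig ((PySem.Dict.ofList gen_rules).keys))]
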